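-- pv_equiv track=rewrite | github.com/ribalda/everybodycodes | 2024/7/step2.py | calc_power
-- ===== SOURCE A (Python) =====
-- def calc_power(devices, track, steps):
--     out = dict()
--     for d in devices:
--         total = 0
--         p = 10
--         for i in range(steps):
--             op = devices[d][i % len(devices[d])]
--             tr = track[i % len(track)]
--             if tr == "+":
--                 p += 1
--             elif tr == "-":
--                 p -= 1
--             elif op == "+":
--                 p += 1
--             elif op == "-":
--                 p -= 1
--             elif op == "=":
--                 p = p
--             total += p
--         out[d] = total
--     return out
-- ===== SOURCE B (Python) =====
-- def calc_power(devices, track, steps):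
--     # Closed form: power deltas are periodic with period L = lcm(len(dev), len(track));
--     # one O(L) pass per device yields per-cycle drift and sum, full cycles are summed arithmetically.
--     def gcd(a, b):
--         while b:
--             a, b = b, a % b
--         return a
--     out = {}
--     lt = len(track)
--     for d in devices:
--         if steps <= 0:
--             out[d] = 0
--             continue
--         v = devices[d]
--         lv = len(v)
--         L = lv * lt // gcd(lv, lt)
--         c, r = divmod(steps, L)
--         S = 0   # running sum of deltas (drift so far)
--         Q = 0   # sum of S after each of the first i steps
--         Qr = 0  # Q after r steps
--         for i in range(min(L, steps)):
--             tr = track[i % lt]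
--             if tr == "+":
--                 S += 1
--             elif tr == "-":
--                 S -= 1
--             else:
--                 op = v[i % lv]
--                 if op == "+":
--                     S += 1
--                 elif op == "-":
--                     S -= 1
--             Q += S
--             if i + 1 == r:
--                 Qr = Q
--         total = c * (10 * L + Q) + L * S * (c * (c - 1) // 2) + r * (10 + c * S) + Qr
--         out[d] = total
--     return out
-- ===== Notes on version B (the rewrite author's own statement) =====
-- stated objective: alternative
-- what changed: A simulates every one of the `steps` iterations per device; B makes one pass over min(lcm(len(device),len(track)), steps) indices collecting the drift, the per-cycle sum and the remainder sum, then combines the full cycles with an arithmetic closed form (Gauss sum), so it does min(period, steps) loop iterations instead of steps.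
import Mathlib
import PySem

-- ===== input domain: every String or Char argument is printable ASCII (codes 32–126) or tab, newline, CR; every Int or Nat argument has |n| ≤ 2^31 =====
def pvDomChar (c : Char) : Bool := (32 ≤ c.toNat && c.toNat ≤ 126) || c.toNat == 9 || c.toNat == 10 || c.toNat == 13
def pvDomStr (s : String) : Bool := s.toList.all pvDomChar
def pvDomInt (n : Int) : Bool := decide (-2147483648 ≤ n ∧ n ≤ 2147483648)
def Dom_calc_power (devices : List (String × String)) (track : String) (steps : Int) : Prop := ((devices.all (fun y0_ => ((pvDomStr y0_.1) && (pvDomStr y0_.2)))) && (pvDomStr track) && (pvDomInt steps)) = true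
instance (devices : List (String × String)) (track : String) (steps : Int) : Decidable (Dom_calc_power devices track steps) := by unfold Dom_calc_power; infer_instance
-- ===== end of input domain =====

-- B replaces A's step-by-step simulation of all `steps` iterations by a single pass over
-- min(period, steps) indices (period = lcm of the two string lengths) plus an arithmetic
-- closed form for the full cycles (objective: alternative algorithm; fewer iterations
-- whenever steps exceeds the period).
-- 'devices' is a Python dict; its items list is the association-list argument here.

-- ===== PORT A =====
-- A's inner loop body: tr/op lookups use i % len (in range, so pyGetD's default is never read);
-- i % 0 (Python ZeroDivisionError on an empty string) is excluded by Pre_.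
def calcA_step (v t : List Char) (st : Int × Int) (i : Int) : Int × Int :=
  let op := PySem.List.pyGetD v (PySem.Int.mod i (v.length : Int)) ' '
  let tr := PySem.List.pyGetD t (PySem.Int.mod i (t.length : Int)) ' '
  let p := if tr = '+' then st.2 + 1 else if tr = '-' then st.2 - 1
           else if op = '+' then st.2 + 1 else if op = '-' then st.2 - 1
           else if op = '=' then st.2 else st.2
  (st.1 + p, p)

def calcA_loop (v t : List Char) (steps : Int) : Int :=
  ((PySem.List.pyRange 0 steps 1).foldl (calcA_step v t) ((0 : Int), (10 : Int))).1

def calc_power (devices : List (String × String)) (track : String) (steps : Int) : List (String × Int) :=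
  devices.map (fun dv => (dv.1, calcA_loop dv.2.toList track.toList steps))

-- ===== PORT B =====
-- Source B's hand-written Euclid loop (arguments are the nonnegative lengths);
-- the first argument of pyGcdLoop is fuel, a pure termination guard (b strictly decreases,
-- so fuel = b always suffices and the 0-fuel branch is never taken)
def pyGcdLoop : Nat → Nat → Nat → Nat
  | _, a, 0 => a
  | 0, a, _ + 1 => a
  | fuel + 1, a, b + 1 => pyGcdLoop fuel (b + 1) (a % (b + 1))

def pyGcd (a b : Nat) : Nat := pyGcdLoop b a b

-- Source B's per-device computation: one pass over the period collecting drift S, per-cycle sum Q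
-- and the remainder sum Qr, then the closed form.
def calcB_step (v t : List Char) (r : Int) (st : Int × Int × Int) (i : Nat) : Int × Int × Int :=
  let tr := t.getD (i % t.length) ' '
  let S := if tr = '+' then st.1 + 1 else if tr = '-' then st.1 - 1
           else
             let op := v.getD (i % v.length) ' '
             if op = '+' then st.1 + 1 else if op = '-' then st.1 - 1 else st.1
  let Q := st.2.1 + S
  let Qr := if (i : Int) + 1 = r then Q else st.2.2
  (S, Q, Qr)

def calcB_device (v t : List Char) (steps : Int) : Int :=
  if steps ≤ 0 then 0
  else
    let L : Nat := v.length * t.length / pyGcd v.length t.length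
    let c : Int := PySem.Int.floordiv steps (L : Int)
    let r : Int := PySem.Int.mod steps (L : Int)
    let st := (List.range (min L steps.toNat)).foldl (calcB_step v t r) ((0 : Int), (0 : Int), (0 : Int))
    c * (10 * (L : Int) + st.2.1) + (L : Int) * st.1 * PySem.Int.floordiv (c * (c - 1)) 2
      + r * (10 + c * st.1) + st.2.2

def calc_power_alt (devices : List (String × String)) (track : String) (steps : Int) : List (String × Int) :=
  devices.map (fun dv => (dv.1, calcB_device dv.2.toList track.toList steps))

-- ===== PRECONDITION & SPEC =====
-- When steps > 0 and there is at least one device, Python A evaluates i % len(s) for the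
-- track and every device string: an empty string there is a ZeroDivisionError, so Pre_
-- excludes exactly those inputs.
def Pre_calc_power (devices : List (String × String)) (track : String) (steps : Int) : Prop :=
  0 < steps → devices ≠ [] → (track ≠ "" ∧ ∀ p ∈ devices, p.2 ≠ "")
instance (devices : List (String × String)) (track : String) (steps : Int) : Decidable (Pre_calc_power devices track steps) := by unfold Pre_calc_power; infer_instance
def pvWitness_calc_power : (List (String × String)) × String × Int := ([("A", "+-=")], "=+-", 7)

def Spec_calc_power (devices : List (String × String)) (track : String) (steps : Int) (out : List (String × Int)) : Prop := out = calc_power_alt devices track steps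
instance (devices : List (String × String)) (track : String) (steps : Int) (out : List (String × Int)) : Decidable (Spec_calc_power devices track steps out) := by unfold Spec_calc_power; infer_instance

-- ===== CLAIM (what is proved, stated in full; the proofs are below) =====
def Claim_equal_calc_power : Prop := ∀ (devices : List (String × String)) (track : String) (steps : Int), Dom_calc_power devices track steps → Pre_calc_power devices track steps → Spec_calc_power devices track steps (calc_power devices track steps)

-- ===== LEMMAS AND PROOFS =====

-- the per-step power delta both programs apply at step i
def delta (v t : List Char) (i : Nat) : Int :=
  let tr := t.getD (i % t.length) ' '
  if tr = '+' then 1 else if tr = '-' then -1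
  else
    let op := v.getD (i % v.length) ' '
    if op = '+' then 1 else if op = '-' then -1 else 0

-- Σ_{j<n} delta (start+j)
def Ssum (v t : List Char) (start n : Nat) : Int :=
  match n with
  | 0 => 0
  | n + 1 => delta v t start + Ssum v t (start + 1) n

-- Σ_{k=1..n} Ssum start k
def Qsum (v t : List Char) (start n : Nat) : Int :=
  match n with
  | 0 => 0
  | n + 1 => (n + 1 : Int) * delta v t start + Qsum v t (start + 1) n

-- A's loop as a structural recursion on (start, count)
def loopA (v t : List Char) (start n : Nat) (st : Int × Int) : Int × Int :=
  match n with
  | 0 => st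
  | n + 1 => loopA v t (start + 1) n (st.1 + (st.2 + delta v t start), st.2 + delta v t start)

theorem stepA_eq (v t : List Char) (i : Nat) (st : Int × Int) :
    calcA_step v t st (i : Int) = (st.1 + (st.2 + delta v t i), st.2 + delta v t i) := by
  simp only [calcA_step, delta, PySem.Int.mod_natCast, PySem.List.pyGetD_natCast, List.getD]
  split_ifs <;> simp only [Prod.mk.injEq] <;> exact ⟨by ring, by ring⟩

theorem stepB_eq (v t : List Char) (r : Int) (i : Nat) (st : Int × Int × Int) :
    calcB_step v t r st i =
      (st.1 + delta v t i, st.2.1 + (st.1 + delta v t i),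
        if (i : Int) + 1 = r then st.2.1 + (st.1 + delta v t i) else st.2.2) := by
  simp only [calcB_step, delta]
  have hS : (if t.getD (i % t.length) ' ' = '+' then st.1 + 1
      else if t.getD (i % t.length) ' ' = '-' then st.1 - 1
      else if v.getD (i % v.length) ' ' = '+' then st.1 + 1
      else if v.getD (i % v.length) ' ' = '-' then st.1 - 1 else st.1)
      = st.1 + (if t.getD (i % t.length) ' ' = '+' then 1
      else if t.getD (i % t.length) ' ' = '-' then -1
      else if v.getD (i % v.length) ' ' = '+' then 1
      else if v.getD (i % v.length) ' ' = '-' then (-1 : Int) else 0) := by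
    split_ifs <;> ring
  rw [hS]

theorem foldl_range'_loopA (v t : List Char) :
    ∀ (n start : Nat) (st : Int × Int),
      ((List.range' start n).map (fun (k : Nat) => (k : Int))).foldl (calcA_step v t) st
        = loopA v t start n st := by
  intro n
  induction n with
  | zero => intro start st; simp [loopA]
  | succ n ih =>
      intro start st
      rw [List.range'_succ]
      simp only [List.map_cons, List.foldl_cons, stepA_eq]
      exact ih (start + 1) _

theorem loopA_spec (v t : List Char) :
    ∀ (n start : Nat) (tot p : Int),
      loopA v t start n (tot, p) = (tot + n * p + Qsum v t start n, p + Ssum v t start n) := by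
  intro n
  induction n with
  | zero => intro start tot p; simp [loopA, Qsum, Ssum]
  | succ n ih =>
      intro start tot p
      simp only [loopA, Qsum, Ssum, ih (start + 1), Prod.mk.injEq]
      exact ⟨by push_cast; ring, by ring⟩

theorem loopA_add (v t : List Char) :
    ∀ (m n start : Nat) (st : Int × Int),
      loopA v t start (m + n) st = loopA v t (start + m) n (loopA v t start m st) := by
  intro m
  induction m with
  | zero => intro n start st; simp [loopA]
  | succ m ih =>
      intro n start st
      have : m + 1 + n = (m + n) + 1 := by omega
      rw [this]
      simp only [loopA]
      rw [ih]
      congr 1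
      omega

theorem delta_period (v t : List Char) (L : Nat) (hv : v.length ∣ L) (ht : t.length ∣ L)
    (i : Nat) : delta v t (i + L) = delta v t i := by
  obtain ⟨a, ha⟩ := hv
  obtain ⟨b, hb⟩ := ht
  have h1 : (i + L) % v.length = i % v.length := by rw [ha, Nat.add_mul_mod_self_left]
  have h2 : (i + L) % t.length = i % t.length := by rw [hb, Nat.add_mul_mod_self_left]
  simp only [delta, h1, h2]

theorem loopA_shift (v t : List Char) (L : Nat) (hv : v.length ∣ L) (ht : t.length ∣ L) :
    ∀ (n start : Nat) (st : Int × Int),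
      loopA v t (start + L) n st = loopA v t start n st := by
  intro n
  induction n with
  | zero => intro start st; simp [loopA]
  | succ n ih =>
      intro start st
      simp only [loopA, delta_period v t L hv ht]
      have h1 : start + L + 1 = (start + 1) + L := by omega
      rw [h1, ih]

theorem loopA_mul_shift (v t : List Char) (L : Nat) (hv : v.length ∣ L) (ht : t.length ∣ L) :
    ∀ (k n : Nat) (st : Int × Int), loopA v t (k * L) n st = loopA v t 0 n st := by
  intro k
  induction k with
  | zero => intro n st; simp
  | succ k ih =>
      intro n st
      have : (k + 1) * L = k * L + L := by ring
      rw [this, loopA_shift v t L hv ht, ih]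

theorem Ssum_succ_right (v t : List Char) :
    ∀ (n start : Nat), Ssum v t start (n + 1) = Ssum v t start n + delta v t (start + n) := by
  intro n
  induction n with
  | zero => intro start; simp [Ssum]
  | succ n ih =>
      intro start
      have h : Ssum v t start (n + 1 + 1) = delta v t start + Ssum v t (start + 1) (n + 1) := rfl
      rw [h, ih (start + 1)]
      have h2 : start + 1 + n = start + (n + 1) := by omega
      rw [h2]
      simp [Ssum]
      ring

theorem Qsum_succ_right (v t : List Char) :
    ∀ (n start : Nat), Qsum v t start (n + 1) = Qsum v t start n + Ssum v t start (n + 1) := by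
  intro n
  induction n with
  | zero => intro start; simp [Qsum, Ssum]
  | succ n ih =>
      intro start
      have h : Qsum v t start (n + 1 + 1)
          = (n + 1 + 1 : Int) * delta v t start + Qsum v t (start + 1) (n + 1) := rfl
      rw [h, ih (start + 1)]
      simp only [Qsum, Ssum]
      ring

-- B's fold over range L computes (Ssum 0 L, Qsum 0 L, Qsum 0 r)
theorem foldB_spec (v t : List Char) (rn : Nat) :
    ∀ (m : Nat),
      (List.range m).foldl (calcB_step v t (rn : Int)) ((0 : Int), (0 : Int), (0 : Int))
        = (Ssum v t 0 m, Qsum v t 0 m,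
            if 1 ≤ rn ∧ rn ≤ m then Qsum v t 0 rn else 0) := by
  intro m
  induction m with
  | zero =>
      simp [Ssum, Qsum]
      omega
  | succ m ih =>
      rw [List.range_succ, List.foldl_append, ih]
      simp only [List.foldl_cons, List.foldl_nil, stepB_eq]
      have hS : Ssum v t 0 m + delta v t m = Ssum v t 0 (m + 1) := by
        rw [Ssum_succ_right]; simp
      have hQ : Qsum v t 0 m + Ssum v t 0 (m + 1) = Qsum v t 0 (m + 1) :=
        (Qsum_succ_right v t m 0).symm
      rw [hS, hQ]
      by_cases hr : rn = m + 1
      · subst hr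
        rw [if_pos (by push_cast; ring), if_pos (by omega)]
      · rw [if_neg (by omega)]
        by_cases h1 : 1 ≤ rn ∧ rn ≤ m
        · rw [if_pos h1, if_pos (by omega)]
        · rw [if_neg h1, if_neg (by omega)]

theorem pyGcdLoop_eq (fuel : Nat) : ∀ (a b : Nat), b ≤ fuel → pyGcdLoop fuel a b = Nat.gcd b a := by
  induction fuel with
  | zero =>
      intro a b hb
      have : b = 0 := by omega
      subst this
      simp [pyGcdLoop]
  | succ fuel ih =>
      intro a b hb
      match b with
      | 0 => simp [pyGcdLoop]
      | b' + 1 =>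
          rw [pyGcdLoop, ih (b' + 1) (a % (b' + 1)) (by have := Nat.mod_lt a (y := b' + 1) (by omega); omega)]
          exact (Nat.gcd_rec (b' + 1) a).symm

theorem pyGcd_eq (a b : Nat) : pyGcd a b = Nat.gcd b a :=
  pyGcdLoop_eq b a b le_rfl

theorem two_mul_tri (c : Nat) : 2 * (c * (c - 1) / 2) = c * (c - 1) := by
  have : 2 ∣ c * (c - 1) := Nat.even_mul_pred_self c |>.two_dvd
  omega

-- the full-cycle closed form for A's loop
theorem loopA_cycles (v t : List Char) (L : Nat) (hv : v.length ∣ L) (ht : t.length ∣ L) :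
    ∀ (c : Nat),
      loopA v t 0 (c * L) ((0 : Int), (10 : Int))
        = ((c : Int) * (10 * L + Qsum v t 0 L)
            + (L : Int) * Ssum v t 0 L * ((c * (c - 1) / 2 : Nat) : Int),
           10 + (c : Int) * Ssum v t 0 L) := by
  intro c
  induction c with
  | zero => simp [loopA]
  | succ c ih =>
      have hsplit : (c + 1) * L = c * L + L := by ring
      rw [hsplit, loopA_add, ih, Nat.zero_add, loopA_mul_shift v t L hv ht]
      rw [loopA_spec]
      have htri : ((c + 1) * ((c + 1) - 1) / 2 : Nat) = (c * (c - 1) / 2 : Nat) + c := by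
        have h1 := two_mul_tri c
        have h2 := two_mul_tri (c + 1)
        have h3 : (c + 1) * ((c + 1) - 1) = c * (c - 1) + 2 * c := by
          cases c with
          | zero => rfl
          | succ k => simp; ring
        omega
      rw [htri]
      simp only [Prod.mk.injEq]
      exact ⟨by push_cast; ring, by push_cast; ring⟩

-- per-device equality for positive steps and nonempty strings
theorem device_eq (v t : List Char) (steps : Int) (hs : 0 < steps)
    (hv : v ≠ []) (ht : t ≠ []) : calcA_loop v t steps = calcB_device v t steps := by
  have hlv : 0 < v.length := List.length_pos_iff.mpr hv
  have hlt : 0 < t.length := List.length_pos_iff.mpr ht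
  set L : Nat := v.length * t.length / pyGcd v.length t.length with hLdef
  have hLlcm : L = Nat.lcm v.length t.length := by
    rw [hLdef, pyGcd_eq, Nat.gcd_comm]; rfl
  have hL : 0 < L := by
    rw [hLlcm]; exact Nat.pos_of_ne_zero (Nat.lcm_ne_zero (by omega) (by omega))
  have hvL : v.length ∣ L := hLlcm ▸ Nat.dvd_lcm_left _ _
  have htL : t.length ∣ L := hLlcm ▸ Nat.dvd_lcm_right _ _
  -- B-side arithmetic: floordiv/mod of steps by L
  have hLpos : (0 : Int) < (L : Int) := by exact_mod_cast hL
  have hfd : PySem.Int.floordiv steps (L : Int) = steps / (L : Int) :=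
    PySem.Int.floordiv_eq_ediv_of_pos hLpos
  have hmd : PySem.Int.mod steps (L : Int) = steps % (L : Int) :=
    PySem.Int.mod_eq_emod_of_pos hLpos
  set c : Nat := (steps / (L : Int)).toNat with hcdef
  set rn : Nat := (steps % (L : Int)).toNat with hrdef
  have hc0 : 0 ≤ steps / (L : Int) := Int.ediv_nonneg (le_of_lt hs) (le_of_lt hLpos)
  have hr0 : 0 ≤ steps % (L : Int) := Int.emod_nonneg _ (by omega)
  have hcc : steps / (L : Int) = (c : Int) := by rw [hcdef]; omega
  have hrr : steps % (L : Int) = (rn : Int) := by rw [hrdef]; omega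
  have hrL : rn < L := by
    have := Int.emod_lt_of_pos steps hLpos
    omega
  have hsplit : steps.toNat = c * L + rn := by
    have := Int.mul_ediv_add_emod steps (L : Int)
    have h1 : ((c * L + rn : Nat) : Int) = steps := by push_cast; rw [← hcc, ← hrr]; linarith
    omega
  -- evaluate A
  have hA : calcA_loop v t steps
      = (loopA v t 0 steps.toNat ((0 : Int), (10 : Int))).1 := by
    unfold calcA_loop
    rw [PySem.List.pyRange_one]
    simp only [Int.sub_zero, zero_add]
    rw [List.range_eq_range', foldl_range'_loopA]
  rw [hA, hsplit, loopA_add, loopA_cycles v t L hvL htL, Nat.zero_add,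
    loopA_mul_shift v t L hvL htL, loopA_spec]
  -- evaluate B
  unfold calcB_device
  rw [if_neg (by omega)]
  simp only [← hLdef, hfd, hmd, hcc, hrr, foldB_spec]
  have hQr : (if 1 ≤ rn ∧ rn ≤ min L steps.toNat then Qsum v t 0 rn else 0)
      = Qsum v t 0 rn := by
    by_cases h1 : 1 ≤ rn
    · rw [if_pos ⟨h1, by omega⟩]
    · have : rn = 0 := by omega
      rw [if_neg (by omega), this]; rfl
  rw [hQr]
  have htri : PySem.Int.floordiv ((c : Int) * ((c : Int) - 1)) 2
      = ((c * (c - 1) / 2 : Nat) : Int) := by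
    have hcast : (c : Int) * ((c : Int) - 1) = ((c * (c - 1) : Nat) : Int) := by
      cases c with
      | zero => simp
      | succ k => push_cast; ring
    rw [hcast]
    exact_mod_cast PySem.Int.floordiv_natCast (c * (c - 1)) 2
  rw [htri]
  by_cases hLe : L ≤ steps.toNat
  · rw [min_eq_left hLe]
  · have hzero : steps / (L : Int) = 0 := Int.ediv_eq_zero_of_lt (by omega) (by omega)
    have hc0 : c = 0 := by rw [hcdef, hzero]; rfl
    have hrn : steps.toNat = rn := by rw [hc0] at hsplit; simpa using hsplit
    have hmin : min L steps.toNat = rn := by omega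
    rw [hmin, hc0]
    push_cast
    ring

-- steps ≤ 0: both sides return 0
theorem device_eq_nonpos (v t : List Char) (steps : Int) (hs : steps ≤ 0) :
    calcA_loop v t steps = calcB_device v t steps := by
  unfold calcA_loop calcB_device
  rw [PySem.List.pyRange_one_eq_nil (by omega), if_pos hs]
  rfl

theorem toList_ne_nil {s : String} (h : s ≠ "") : s.toList ≠ [] := by
  intro hnil
  apply h
  simpa using congrArg String.ofList hnil

-- ===== VERDICT (by name: the statement is the Claim_ definition above) =====
theorem calc_power_spec : Claim_equal_calc_power := by
  intro devices track steps _ hpre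
  unfold Spec_calc_power calc_power calc_power_alt
  apply List.map_congr_left
  intro dv hdv
  by_cases hs : steps ≤ 0
  · rw [device_eq_nonpos _ _ _ hs]
  · obtain ⟨ht, hv⟩ := hpre (by omega) (List.ne_nil_of_mem hdv)
    rw [device_eq _ _ _ (by omega) (toList_ne_nil (hv dv hdv)) (toList_ne_nil ht)]
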